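-- pv_equiv track=rewrite | github.com/webspoilt/omniclaw | modules/evolution/evolution_agent.py | extract_traceback
-- ===== SOURCE A (Python) =====
-- from typing import Optional, List, Tuple
--
-- def extract_traceback(lines: List[str]) -> Optional[str]:
--     tb: List[str] = []
--     in_tb = False
--     for line in lines:
--         if line.startswith("Traceback (most recent call last):"):
--             in_tb = True
--             tb = [line.strip()]
--         elif in_tb:
--             tb.append(line.strip())
--             if not line.startswith((" ", "\t", "  File")):
--                 in_tb = False
--     return "\n".join(tb) if tb else None
-- ===== SOURCE B (Python) =====
-- from typing import Optional, List
--
-- _HDR = "Traceback (most recent call last):"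
--
-- def extract_traceback(lines: List[str]) -> Optional[str]:
--     # Locate the LAST header line, remembering it together with the lines after it.
--     found = None
--     for i, line in enumerate(lines):
--         if line.startswith(_HDR):
--             found = (line, lines[i + 1:])
--     if found is None:
--         return None
--     head, rest = found
--     tb = [head.strip()]
--     for line in rest:
--         tb.append(line.strip())
--         if not line.startswith((" ", "\t")):
--             break
--     return "\n".join(tb)
-- ===== Notes on version B (the rewrite author's own statement) =====
-- stated objective: alternative
-- what changed: Replaces A's interleaved in_tb state machine over all lines by a locate-then-extract decomposition: first find the last header line and keep its suffix, then collect stripped lines forward with an early break after the first non-indented line.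
import Mathlib
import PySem

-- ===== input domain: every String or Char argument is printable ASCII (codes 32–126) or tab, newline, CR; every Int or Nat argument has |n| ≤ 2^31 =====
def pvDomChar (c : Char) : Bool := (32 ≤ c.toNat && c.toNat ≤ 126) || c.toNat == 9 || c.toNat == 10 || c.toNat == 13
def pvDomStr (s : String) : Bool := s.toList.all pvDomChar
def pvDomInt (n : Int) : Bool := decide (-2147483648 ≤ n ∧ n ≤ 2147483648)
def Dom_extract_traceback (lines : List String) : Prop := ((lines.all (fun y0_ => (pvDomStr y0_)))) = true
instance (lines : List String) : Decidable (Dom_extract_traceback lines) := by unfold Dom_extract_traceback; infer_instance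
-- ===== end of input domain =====

-- B replaces A's interleaved in_tb state machine by a locate-then-extract decomposition (same cost); return-value equivalence.

-- ===== PORT A =====
-- loop body of A's for-loop, state (tb, in_tb)
def stepA (s : List String × Bool) (line : String) : List String × Bool :=
  if PySem.Str.startswith line "Traceback (most recent call last):" then
    ([PySem.Str.strip line], true)
  else if s.2 then
    (s.1 ++ [PySem.Str.strip line],
     if !(PySem.Str.startswith line " " || PySem.Str.startswith line "\t" ||
          PySem.Str.startswith line "  File") then false else s.2)
  else s

def extract_traceback (lines : List String) : Option String :=
  match lines.foldl stepA (([] : List String), false) with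
  | (tb, _) => if tb.isEmpty then none else some (PySem.Str.join "\n" tb)

-- ===== PORT B =====
-- loop body of B's locating loop: remember the last header line with the lines after it
def stepB (lines : List String) (acc : Option (String × List String)) (p : Int × String) :
    Option (String × List String) :=
  if PySem.Str.startswith p.2 "Traceback (most recent call last):" then
    some (p.2, PySem.List.slice lines (some (p.1 + 1)) none)
  else acc

-- B's collecting loop (append stripped line; break after the first non-indented one)
def tbCollect (rest : List String) : List String :=
  match rest with
  | [] => []
  | line :: ls =>
    PySem.Str.strip line ::
      (if PySem.Str.startswith line " " || PySem.Str.startswith line "\t" then tbCollect ls else [])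

def extract_traceback_alt (lines : List String) : Option String :=
  match (PySem.List.enumerate lines).foldl (stepB lines) none with
  | none => none
  | some (head, rest) =>
      some (PySem.Str.join "\n" (PySem.Str.strip head :: tbCollect rest))

-- ===== PRECONDITION & SPEC =====
def Spec_extract_traceback (lines : List String) (out : Option String) : Prop := out = extract_traceback_alt lines
instance (lines : List String) (out : Option String) : Decidable (Spec_extract_traceback lines out) := by unfold Spec_extract_traceback; infer_instance

-- ===== CLAIM (what is proved, stated in full; the proofs are below) =====
def Claim_equal_extract_traceback : Prop := ∀ (lines : List String), Dom_extract_traceback lines → Spec_extract_traceback lines (extract_traceback lines)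

-- ===== LEMMAS AND PROOFS =====

-- A's collecting behaviour (with A's redundant "  File" test)
def collectA (rest : List String) : List String :=
  match rest with
  | [] => []
  | line :: ls =>
    PySem.Str.strip line ::
      (if PySem.Str.startswith line " " || PySem.Str.startswith line "\t" ||
          PySem.Str.startswith line "  File" then collectA ls else [])

-- the last traceback block, located from the front
def lastHdr (ls : List String) : Option (String × List String) :=
  match ls with
  | [] => none
  | l :: ls =>
    match lastHdr ls with
    | some p => some p
    | none =>
      if PySem.Str.startswith l "Traceback (most recent call last):" then some (l, ls) else none

lemma lastHdr_cons (l : String) (ls : List String) :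
    lastHdr (l :: ls) =
      match lastHdr ls with
      | some p => some p
      | none =>
        if PySem.Str.startswith l "Traceback (most recent call last):" = true then some (l, ls)
        else none := rfl

lemma collectA_cons (l : String) (ls : List String) :
    collectA (l :: ls) =
      PySem.Str.strip l ::
        (if (PySem.Str.startswith l " " || PySem.Str.startswith l "\t" ||
            PySem.Str.startswith l "  File") = true then collectA ls else []) := rfl

lemma sw_file_imp_sw_space (cs : List Char) :
    PySem.Chars.startswith cs [' ', ' ', 'F', 'i', 'l', 'e'] = true →
    PySem.Chars.startswith cs [' '] = true := by
  simp only [PySem.Chars.startswith_iff]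
  intro h
  exact List.IsPrefix.trans (by decide) h

lemma collectA_eq_tbCollect (rest : List String) : collectA rest = tbCollect rest := by
  induction rest with
  | nil => rfl
  | cons l ls ih =>
    simp only [collectA, tbCollect, ih, PySem.Str.startswith_eq]
    by_cases h : PySem.Chars.startswith l.toList [' ', ' ', 'F', 'i', 'l', 'e'] = true
    · simp [h, sw_file_imp_sw_space _ h]
    · simp [h]

lemma foldA_fst (lines : List String) : ∀ (tb : List String) (b : Bool),
    (lines.foldl stepA (tb, b)).1 =
      match lastHdr lines with
      | some p => PySem.Str.strip p.1 :: collectA p.2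
      | none => if b then tb ++ collectA lines else tb := by
  induction lines with
  | nil => intro tb b; cases b <;> simp [lastHdr, collectA]
  | cons l ls ih =>
    intro tb b
    rw [List.foldl_cons]
    cases hh : PySem.Str.startswith l "Traceback (most recent call last):" with
    | true =>
      rw [show stepA (tb, b) l = ([PySem.Str.strip l], true) by
        unfold stepA; rw [hh]; simp]
      rw [ih, lastHdr_cons]
      cases hls : lastHdr ls with
      | some p => rfl
      | none => rw [hh]; simp
    | false =>
      cases b with
      | false =>
        rw [show stepA (tb, false) l = (tb, false) by unfold stepA; rw [hh]; simp]
        rw [ih, lastHdr_cons]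
        cases hls : lastHdr ls with
        | some p => rfl
        | none => rw [hh]; simp
      | true =>
        cases hC : (PySem.Str.startswith l " " || PySem.Str.startswith l "\t" ||
            PySem.Str.startswith l "  File") with
        | true =>
          rw [show stepA (tb, true) l = (tb ++ [PySem.Str.strip l], true) by
            unfold stepA; rw [hh, hC]; simp]
          rw [ih, lastHdr_cons]
          cases hls : lastHdr ls with
          | some p => rfl
          | none =>
            rw [hh, collectA_cons, hC]
            simp
        | false =>
          rw [show stepA (tb, true) l = (tb ++ [PySem.Str.strip l], false) by
            unfold stepA; rw [hh, hC]; simp]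
          rw [ih, lastHdr_cons]
          cases hls : lastHdr ls with
          | some p => rfl
          | none =>
            rw [hh, collectA_cons, hC]
            simp

lemma foldB_eq (lines : List String) : ∀ (cur pre : List String), pre ++ cur = lines →
    ∀ (acc : Option (String × List String)),
    (PySem.List.enumerate cur ((pre.length : Int))).foldl (stepB lines) acc =
      match lastHdr cur with
      | some p => some p
      | none => acc := by
  intro cur
  induction cur with
  | nil => intro pre _ acc; simp [PySem.List.enumerate_nil, lastHdr]
  | cons l ls ih =>
    intro pre hpre acc
    rw [PySem.List.enumerate_cons, List.foldl_cons]
    have hstep : stepB lines acc ((pre.length : Int), l) =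
        if PySem.Str.startswith l "Traceback (most recent call last):" then some (l, ls)
        else acc := by
      simp only [stepB]
      have hc : ((pre.length : Int) + 1) = (((pre.length + 1 : Nat)) : Int) := by push_cast; ring
      rw [hc, PySem.List.slice_from_natCast]
      have hdrop : lines.drop (pre.length + 1) = ls := by
        rw [← hpre, show pre ++ l :: ls = (pre ++ [l]) ++ ls by simp,
          show pre.length + 1 = (pre ++ [l]).length by simp]
        exact List.drop_left
      rw [hdrop]
    have hc2 : ((pre.length : Int) + 1) = (((pre ++ [l]).length : Nat) : Int) := by
      simp
    rw [hc2, ih (pre ++ [l]) (by simp [hpre]) _, hstep]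
    rw [lastHdr_cons]
    cases hls : lastHdr ls with
    | some p => rfl
    | none =>
      by_cases hh : PySem.Str.startswith l "Traceback (most recent call last):" = true
      · rw [if_pos hh, if_pos hh]
      · rw [if_neg hh, if_neg hh]

lemma alt_eq (lines : List String) :
    extract_traceback_alt lines =
      match lastHdr lines with
      | none => none
      | some p => some (PySem.Str.join "\n" (PySem.Str.strip p.1 :: tbCollect p.2)) := by
  unfold extract_traceback_alt
  have h := foldB_eq lines lines [] rfl none
  simp only [List.length_nil, Nat.cast_zero] at h
  rw [h]
  cases lastHdr lines with
  | none => rfl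
  | some p => rfl

-- ===== VERDICT (by name: the statement is the Claim_ definition above) =====
theorem extract_traceback_spec : Claim_equal_extract_traceback := by
  intro lines _
  unfold Spec_extract_traceback
  rw [alt_eq]
  unfold extract_traceback
  rcases hr : lines.foldl stepA (([] : List String), false) with ⟨tb, b⟩
  have hfst := foldA_fst lines [] false
  rw [hr] at hfst
  cases h : lastHdr lines with
  | none => rw [h] at hfst; simp at hfst; simp [hfst]
  | some p =>
    rw [h] at hfst
    simp only at hfst
    simp [hfst, collectA_eq_tbCollect]
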